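-- pv_equiv track=rewrite | github.com/vagarwala/CodeWars-Solutions | pattern15.py | pattern15
-- ===== SOURCE A (Python) =====
-- def pattern15(n,x=1,y=1,*args):
--     if n == 1:
--         return '1' + '\n' * (y-1)
--     l = []
--     for i in range(0,n):
--         q = n - i
--         s = " " * (q - 1)
--         s += str((n - i) % 10)
--         s += " " * (n - q)
--         s = s + s[:-1][::-1]
--         j = s[1:]
--         for i in range(1,x):
--             s += j
--         l += [s]
--     l = l[1:][::-1] + l
--     z = l[1:]
--     for i in range(1,y):
--         l += z
--     return "\n".join(l)
-- ===== SOURCE B (Python) =====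
-- def _tile_row(n, x, r):
--     # one global output row, computed directly from its distance i to the diamond center
--     i = abs(r - (n - 1))
--     d = str((n - i) % 10)
--     if i == 0:
--         line = ' ' * (n - 1) + d + ' ' * (n - 1)
--     else:
--         line = ' ' * (n - 1 - i) + d + ' ' * (2 * i - 1) + d + ' ' * (n - 1 - i)
--     return line + line[1:] * (x - 1)
--
-- def pattern15(n, x=1, y=1, *args):
--     if n == 1:
--         return '1' + '\n' * (y - 1)
--     lines = [_tile_row(n, x, r) for r in range(2 * n - 1)]
--     return '\n'.join(lines + lines[1:] * (y - 1))
-- ===== Notes on version B (the rewrite author's own statement) =====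
-- stated objective: alternative
-- what changed: Each output row is computed directly from its distance to the diamond center (digit and symmetric space runs from geometry), and the one-character/one-row overlapped tiling is done by sequence repetition of line[1:] / lines[1:], replacing A's build-half-then-mirror-by-slicing lists and its repeated += loops.
import Mathlib
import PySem

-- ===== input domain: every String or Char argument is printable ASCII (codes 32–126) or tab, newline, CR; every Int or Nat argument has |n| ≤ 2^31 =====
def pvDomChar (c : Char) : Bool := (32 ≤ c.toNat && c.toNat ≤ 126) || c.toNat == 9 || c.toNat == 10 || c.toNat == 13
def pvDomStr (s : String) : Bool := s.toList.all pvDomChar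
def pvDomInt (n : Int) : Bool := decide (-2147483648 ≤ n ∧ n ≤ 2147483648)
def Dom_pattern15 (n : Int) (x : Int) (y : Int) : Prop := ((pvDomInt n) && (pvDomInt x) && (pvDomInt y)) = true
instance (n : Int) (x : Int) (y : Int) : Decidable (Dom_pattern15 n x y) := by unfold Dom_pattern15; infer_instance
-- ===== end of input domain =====

-- B computes each output row directly from its distance to the diamond center and tiles by
-- sequence repetition, instead of A's build-half-then-mirror list slicing and += loops (alternative decomposition, same cost).


-- ===== PORT A =====
-- the body of A's 'for i in range(0,n)' loop: builds one mirrored, horizontally tiled row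
def pattern15_rowA (n : Int) (x : Int) (i : Int) : List Char :=
  let q := n - i
  let s := PySem.List.pyRepeat [' '] (q - 1)                              -- " " * (q - 1)
  let s := s ++ PySem.Int.toChars (PySem.Int.mod (n - i) 10)              -- += str((n - i) % 10)
  let s := s ++ PySem.List.pyRepeat [' '] (n - q)                         -- += " " * (n - q)
  let s := s ++ (PySem.List.slice s none (some (-1))).reverse            -- s + s[:-1][::-1]  ([::-1] = reverse, PySem.List.slice?_none_none_neg_one)
  let j := PySem.List.slice s (some 1) none                               -- j = s[1:]
  (PySem.List.pyRange 1 x 1).foldl (fun s _ => s ++ j) s                  -- for i in range(1,x): s += j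

def pattern15 (n : Int) (x : Int) (y : Int) : String :=
  if n == 1 then String.ofList ('1' :: PySem.List.pyRepeat ['\n'] (y - 1))
  else
    let l := (PySem.List.pyRange 0 n 1).foldl
      (fun l i => l ++ [pattern15_rowA n x i]) ([] : List (List Char))    -- l += [s]
    let l := (PySem.List.slice l (some 1) none).reverse ++ l              -- l = l[1:][::-1] + l
    let z := PySem.List.slice l (some 1) none                              -- z = l[1:]
    let l := (PySem.List.pyRange 1 y 1).foldl (fun l _ => l ++ z) l       -- for i in range(1,y): l += z
    String.ofList (PySem.Chars.join ['\n'] l)                             -- "\n".join(l)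

-- ===== PORT B =====
-- Source B's _tile_row: one global row from its distance i to the diamond center
def pattern15_rowB (n : Int) (x : Int) (r : Int) : List Char :=
  let i := |r - (n - 1)|
  let d := PySem.Int.toChars (PySem.Int.mod (n - i) 10)
  let line :=
    if i == 0 then
      PySem.List.pyRepeat [' '] (n - 1) ++ d ++ PySem.List.pyRepeat [' '] (n - 1)
    else
      PySem.List.pyRepeat [' '] (n - 1 - i) ++ d ++ PySem.List.pyRepeat [' '] (2*i - 1)
        ++ d ++ PySem.List.pyRepeat [' '] (n - 1 - i)
  line ++ PySem.List.pyRepeat (PySem.List.slice line (some 1) none) (x - 1)  -- line + line[1:] * (x-1)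

def pattern15_alt (n : Int) (x : Int) (y : Int) : String :=
  if n == 1 then String.ofList ('1' :: PySem.List.pyRepeat ['\n'] (y - 1))
  else
    let lines := (PySem.List.pyRange 0 (2*n - 1) 1).map (pattern15_rowB n x)
    String.ofList (PySem.Chars.join ['\n']
      (lines ++ PySem.List.pyRepeat (PySem.List.slice lines (some 1) none) (y - 1)))  -- lines + lines[1:] * (y-1)

-- ===== PRECONDITION & SPEC =====
def Spec_pattern15 (n : Int) (x : Int) (y : Int) (out : String) : Prop := out = pattern15_alt n x y
instance (n : Int) (x : Int) (y : Int) (out : String) : Decidable (Spec_pattern15 n x y out) := by unfold Spec_pattern15; infer_instance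

-- ===== CLAIM (what is proved, stated in full; the proofs are below) =====
def Claim_equal_pattern15 : Prop := ∀ (n : Int) (x : Int) (y : Int), Dom_pattern15 n x y → Spec_pattern15 n x y (pattern15 n x y)

-- ===== LEMMAS AND PROOFS =====

theorem pv_foldl_snoc {α β : Type} (l : List α) (f : α → β) (acc : List β) :
    l.foldl (fun a x => a ++ [f x]) acc = acc ++ l.map f := by
  induction l generalizing acc with
  | nil => simp
  | cons h t ih => simp [ih]

theorem pv_foldl_append_const {α β : Type} (l : List α) (z : List β) (acc : List β) :
    l.foldl (fun a _ => a ++ z) acc = acc ++ (List.replicate l.length z).flatten := by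
  induction l generalizing acc with
  | nil => simp
  | cons h t ih => simp [ih, List.replicate_succ]

theorem pv_pyRepeat_eq {α : Type} (j : List α) (n : Int) :
    PySem.List.pyRepeat j n = (List.replicate n.toNat j).flatten := by
  simp [PySem.List.pyRepeat]

theorem pv_toChars_digit (m : Int) (h0 : 0 ≤ m) (h9 : m < 10) : ∃ c, PySem.Int.toChars m = [c] := by
  have : m = 0 ∨ m = 1 ∨ m = 2 ∨ m = 3 ∨ m = 4 ∨ m = 5 ∨ m = 6 ∨ m = 7 ∨ m = 8 ∨ m = 9 := by omega
  rcases this with h|h|h|h|h|h|h|h|h|h <;> subst h <;>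
    first
    | exact ⟨'0', by decide⟩ | exact ⟨'1', by decide⟩ | exact ⟨'2', by decide⟩
    | exact ⟨'3', by decide⟩ | exact ⟨'4', by decide⟩ | exact ⟨'5', by decide⟩
    | exact ⟨'6', by decide⟩ | exact ⟨'7', by decide⟩ | exact ⟨'8', by decide⟩
    | exact ⟨'9', by decide⟩

theorem pv_map_pyRange_one {α : Type} (a b : Int) (g : Int → α) :
    ((PySem.List.pyRange a b 1).map g) = (List.range (b-a).toNat).map (fun (k : Nat) => g (a + (k : Int))) := by
  rw [PySem.List.pyRange_one, List.map_map]; simp [Function.comp]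

-- rowB depends only on the distance |r - (n-1)|, hence is symmetric about the center row
theorem pv_rowB_symm (n x r : Int) : pattern15_rowB n x r = pattern15_rowB n x (2*(n-1) - r) := by
  unfold pattern15_rowB
  have h : |2*(n-1) - r - (n - 1)| = |r - (n - 1)| := by
    have e : 2*(n-1) - r - (n - 1) = -(r - (n-1)) := by ring
    rw [e, abs_neg]
  rw [h]

-- mirroring a half-line (a spaces, digit, b spaces) yields the symmetric full line
theorem pv_mirror_line (a b : Nat) (c : Char) :
    (List.replicate a ' ' ++ [c] ++ List.replicate b ' ')
      ++ (List.replicate a ' ' ++ [c] ++ List.replicate b ' ').dropLast.reverse =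
    if b = 0 then List.replicate a ' ' ++ [c] ++ List.replicate a ' '
    else List.replicate a ' ' ++ [c] ++ List.replicate (b + (b-1)) ' ' ++ [c] ++ List.replicate a ' ' := by
  cases b with
  | zero => simp
  | succ k =>
      simp only [Nat.succ_ne_zero, if_false, List.replicate_succ', ← List.append_assoc]
      rw [List.dropLast_concat]
      simp only [List.reverse_append, List.reverse_replicate, List.reverse_singleton,
        List.append_assoc]
      rw [show ([' '] : List Char) = List.replicate 1 ' ' from rfl]
      rw [← List.append_assoc (List.replicate k ' ') (List.replicate 1 ' '),
        List.replicate_append_replicate]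
      rw [← List.append_assoc (List.replicate (k + 1) ' ') (List.replicate k ' '),
        List.replicate_append_replicate]
      rw [show k + 1 + k = k + 1 + (k + 1 - 1) from by omega]

-- A's loop body equals B's direct row at the corresponding global row index
theorem pv_rowA_eq_rowB (n x i : Int) (_hn : 2 ≤ n) (h0 : 0 ≤ i) (hi : i ≤ n - 1) :
    pattern15_rowA n x i = pattern15_rowB n x (i + (n-1)) := by
  obtain ⟨c, hc⟩ := pv_toChars_digit (PySem.Int.mod (n - i) 10)
    (PySem.Int.mod_nonneg _ (by norm_num)) (PySem.Int.mod_lt _ (by norm_num))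
  unfold pattern15_rowA pattern15_rowB
  have habs : |i + (n-1) - (n - 1)| = i := by
    rw [show i + (n-1) - (n-1) = i from by ring, abs_of_nonneg h0]
  rw [habs, hc]
  simp only [PySem.List.slice_to_neg_one, PySem.List.slice_from_one,
    PySem.List.pyRepeat_singleton]
  rw [pv_foldl_append_const, PySem.List.length_pyRange_one, pv_pyRepeat_eq]
  have htile : ∀ (s t : List Char), s = t →
      s ++ (List.replicate (x-1).toNat s.tail).flatten
        = t ++ (List.replicate (x-1).toNat t.tail).flatten := by
    rintro s t rfl; rfl
  apply htile
  rw [show n - (n - i) = i from by ring, pv_mirror_line]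
  by_cases h : i = 0
  · subst h
    simp only [Int.toNat_zero, beq_self_eq_true, if_true]
    rw [hc, show (n - 0 - 1 : Int) = n - 1 from by ring]
  · rw [if_neg (show ¬ i.toNat = 0 from by omega),
      if_neg (show ¬ ((i == 0) = true) from by simp [h])]
    rw [show (n - i - 1).toNat = (n - 1 - i).toNat from by omega,
      show i.toNat + (i.toNat - 1) = (2*i - 1).toNat from by omega, hc]

-- B's global row list is exactly A's mirrored list
theorem pv_rows_eq (n x : Int) (hn : 2 ≤ n) :
    (PySem.List.pyRange 0 (2*n - 1) 1).map (pattern15_rowB n x)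
      = ((PySem.List.pyRange 0 n 1).map (pattern15_rowA n x)).tail.reverse
        ++ (PySem.List.pyRange 0 n 1).map (pattern15_rowA n x) := by
  rw [PySem.List.pyRange_one_append 0 (n-1) (2*n-1) (by omega) (by omega), List.map_append]
  congr 1
  · -- upper half: rows 0..n-2, reversed tail of A's list
    have htail : ((PySem.List.pyRange 0 n 1).map (pattern15_rowA n x)).tail
        = (PySem.List.pyRange 1 n 1).map (pattern15_rowA n x) := by
      rw [PySem.List.pyRange_one_cons (show (0:Int) < n from by omega)]; simp
    rw [htail, pv_map_pyRange_one, pv_map_pyRange_one]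
    apply List.ext_getElem
    · simp
    · intro k h1 h2
      simp only [List.getElem_map, List.getElem_range, List.getElem_reverse, List.length_map,
        List.length_range]
      rw [pv_rowB_symm]
      have hk1 : (k : Int) < n - 1 := by
        simp only [List.length_map, List.length_range] at h1; omega
      have e2 : (1 + (((n - 1).toNat - 1 - k : Nat) : Int)) = n - 1 - (k : Int) := by omega
      rw [e2, pv_rowA_eq_rowB n x (n - 1 - (k : Int)) hn (by omega) (by omega)]
      congr 1
      omega
  · -- lower half: rows n-1..2n-2 are A's rows 0..n-1 shifted
    rw [pv_map_pyRange_one, pv_map_pyRange_one]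
    have hlen : (2*n - 1 - (n-1)).toNat = (n - 0).toNat := by omega
    rw [hlen]
    apply List.map_congr_left
    intro k hk
    simp only [List.mem_range] at hk
    have hkn : (k : Int) ≤ n - 1 := by omega
    rw [pv_rowA_eq_rowB n x (0 + (k:Int)) hn (by omega) (by omega)]
    congr 1
    omega

theorem pv_main (n x y : Int) : pattern15 n x y = pattern15_alt n x y := by
  by_cases h1 : n = 1
  · subst h1; rfl
  · unfold pattern15 pattern15_alt
    have hb : (n == 1) = false := by simp [h1]
    rw [hb]
    simp only [Bool.false_eq_true, if_false]
    by_cases hn : n ≤ 0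
    · -- both ranges are empty: both sides are the empty string
      rw [PySem.List.pyRange_one_eq_nil (show (n:Int) ≤ 0 from by omega), PySem.List.pyRange_one_eq_nil (show (2*n-1:Int) ≤ 0 from by omega)]
      simp [pv_pyRepeat_eq, PySem.List.slice_from_one]
    · have hn2 : 2 ≤ n := by omega
      rw [pv_rows_eq n x hn2, pv_foldl_snoc, pv_foldl_append_const, pv_pyRepeat_eq,
        PySem.List.length_pyRange_one, List.nil_append]
      simp only [PySem.List.slice_from_one]

-- ===== VERDICT (by name: the statement is the Claim_ definition above) =====
theorem pattern15_spec : Claim_equal_pattern15 := by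
  intro n x y _
  exact pv_main n x y
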